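-- pv_equiv track=rewrite | github.com/saviaa1/AdventOfCode | 2021/Day15/2021_15d.py | enlargeMap
-- ===== SOURCE A (Python) =====
-- def enlargeMap(data: list[list[int]]):
--     #insert to right
--     for x in range(len(data)):
--         for i in range(0, len(data[x]) * 4):
--             var = data[x][i]+1
--             data[x].append(var if var <= 9 else 1)
--     #insert to bottom and bottom right.
--     for x in range(0, len(data) * 4):
--         tempArr = []
--         for y in range(0, len(data[x])):
--             var = data[x][y]+1
--             tempArr.append(var if var <= 9 else 1)
--         data.append(tempArr)
--     return data
-- ===== SOURCE B (Python) =====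
-- def enlargeMap(data: list[list[int]]):
--     # Precompute the nine bumped copies of the original grid (tile offsets 0..8),
--     # then assemble the 5x5 tiling by picking whole rows from them.
--     def bump(v):
--         return v + 1 if v <= 8 else 1
--     grids = [[list(row) for row in data]]
--     for _ in range(8):
--         grids.append([[bump(v) for v in row] for row in grids[-1]])
--     n = len(data)
--     for x in range(n):
--         data[x].extend(v for k in range(1, 5) for v in grids[k][x])
--     for i in range(1, 5):
--         for x in range(n):
--             data.append([v for j in range(5) for v in grids[i + j][x]])
--     return data
-- ===== Notes on version B (the rewrite author's own statement) =====
-- stated objective: alternative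
-- what changed: B precomputes the nine bumped copies of the original grid once and assembles every tile of the 5x5 enlargement by picking whole rows from them, instead of A's propagation that repeatedly re-reads already-written cells of the structure it is growing.
import Mathlib
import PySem

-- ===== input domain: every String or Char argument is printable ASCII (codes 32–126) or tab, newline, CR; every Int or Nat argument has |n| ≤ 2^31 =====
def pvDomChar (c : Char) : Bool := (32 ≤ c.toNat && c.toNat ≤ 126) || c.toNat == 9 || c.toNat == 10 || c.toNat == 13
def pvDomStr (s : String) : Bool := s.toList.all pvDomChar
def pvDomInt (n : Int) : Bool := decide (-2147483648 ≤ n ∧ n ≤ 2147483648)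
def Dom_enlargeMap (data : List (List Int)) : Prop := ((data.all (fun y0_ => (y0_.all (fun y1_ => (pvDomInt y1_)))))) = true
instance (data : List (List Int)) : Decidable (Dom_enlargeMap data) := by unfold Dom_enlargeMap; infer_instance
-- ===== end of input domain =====

-- B precomputes the nine bumped copies of the original grid and assembles the 5x5 tiling from
-- whole rows of them, instead of A's propagation through the growing structure; both Pythons
-- mutate `data` in place and return it (the equivalence proved is about the return value).


-- ===== PORT A =====
-- `var if var <= 9 else 1` with var = v+1
def pvStepA (v : Int) : Int := if v + 1 ≤ 9 then v + 1 else 1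

-- first loop body for one row: `for i in range(0, len(data[x])*4): data[x].append(...)`;
-- the read index i is always < the current length of the growing row, so getD's default is never used (exact).
def pvGrowRow (row : List Int) : List Int :=
  (List.range (row.length * 4)).foldl (fun r i => r ++ [pvStepA (r.getD i 0)]) row

-- inner loop building tempArr (index y < len(row), so getD's default is never used; exact)
def pvTempArr (row : List Int) : List Int :=
  (List.range row.length).foldl (fun t y => t ++ [pvStepA (row.getD y 0)]) []

def enlargeMap (data : List (List Int)) : List (List Int) :=
  -- the first loop modifies only row x at iteration x, so it is a map over the rows;
  -- the second loop's bound len(data)*4 is evaluated before any row is appended.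
  let d1 := data.map pvGrowRow
  (List.range (d1.length * 4)).foldl (fun d x => d ++ [pvTempArr (d.getD x [])]) d1

-- ===== PORT B =====
def pvBump (v : Int) : Int := if v ≤ 8 then v + 1 else 1

-- `grids = [snapshot]; for _ in range(8): grids.append(bump of grids[-1])`
def pvGrids (data : List (List Int)) : List (List (List Int)) :=
  (List.range 8).foldl
    (fun gs _ => gs ++ [(gs.getLastD []).map (fun row => row.map pvBump)]) [data]

def enlargeMap_alt (data : List (List Int)) : List (List Int) :=
  let gs := pvGrids data
  (data.mapIdx (fun x row =>
      row ++ (List.range' 1 4).flatMap (fun k => (gs.getD k []).getD x [])))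
    ++ (List.range' 1 4).flatMap (fun i =>
        (List.range data.length).map (fun x =>
          (List.range 5).flatMap (fun j => (gs.getD (i + j) []).getD x [])))

-- ===== PRECONDITION & SPEC =====
def Spec_enlargeMap (data : List (List Int)) (out : List (List Int)) : Prop := out = enlargeMap_alt data
instance (data : List (List Int)) (out : List (List Int)) : Decidable (Spec_enlargeMap data out) := by unfold Spec_enlargeMap; infer_instance

-- ===== CLAIM (what is proved, stated in full; the proofs are below) =====
def Claim_equal_enlargeMap : Prop := ∀ (data : List (List Int)), Dom_enlargeMap data → Spec_enlargeMap data (enlargeMap data)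

-- ===== LEMMAS AND PROOFS =====

-- the "stream" of the self-extending fold: position i holds g iterated (i / w) times on xs[i % w]
def pvS {α : Type} (g : α → α) (d : α) (xs : List α) (i : Nat) : α :=
  g^[i / xs.length] (xs.getD (i % xs.length) d)

theorem pvS_lt {α : Type} (g : α → α) (d : α) (xs : List α) (i : Nat) (h : i < xs.length) :
    pvS g d xs i = xs.getD i d := by
  unfold pvS
  rw [Nat.div_eq_of_lt h, Nat.mod_eq_of_lt h]
  simp

theorem pvS_add {α : Type} (g : α → α) (d : α) (xs : List α) (hw : xs ≠ []) (i : Nat) :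
    pvS g d xs (xs.length + i) = g (pvS g d xs i) := by
  have hw0 : 0 < xs.length := List.length_pos_iff.mpr hw
  unfold pvS
  rw [Nat.add_comm, Nat.add_div_right _ hw0, Nat.add_mod_right]
  rw [Function.iterate_succ_apply']

theorem pvGrow_eq {α : Type} (g : α → α) (d : α) (xs : List α) (hw : xs ≠ []) (m : Nat) :
    (List.range m).foldl (fun r i => r ++ [g (r.getD i d)]) xs
      = (List.range (xs.length + m)).map (pvS g d xs) := by
  have hw0 : 0 < xs.length := List.length_pos_iff.mpr hw
  induction m with
  | zero =>
    simp only [List.range_zero, List.foldl_nil, Nat.add_zero]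
    apply List.ext_getElem
    · simp
    · intro i h1 h2
      simp only [List.getElem_map, List.getElem_range]
      rw [pvS_lt g d xs i (by simpa using h2), List.getD_eq_getElem xs d (by simpa using h2)]
  | succ m ih =>
    rw [List.range_succ, List.foldl_append, ih]
    simp only [List.foldl_cons, List.foldl_nil]
    have hlt : m < xs.length + m := by omega
    have hget : (((List.range (xs.length + m)).map (pvS g d xs)).getD m d) = pvS g d xs m := by
      rw [List.getD_eq_getElem _ d (by simpa using hlt)]
      simp
    rw [hget]
    have : xs.length + (m + 1) = (xs.length + m) + 1 := by omega
    rw [this, List.range_succ, List.map_append]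
    simp only [List.map_cons, List.map_nil, List.append_cancel_left_eq]
    rw [pvS_add g d xs hw m]

theorem pvS_block {α : Type} (g : α → α) (d : α) (xs : List α) (k : Nat) :
    (List.range' (k * xs.length) xs.length).map (pvS g d xs) = xs.map (g^[k]) := by
  apply List.ext_getElem
  · simp
  · intro i h1 h2
    simp only [List.getElem_map, List.getElem_range']
    have hi : i < xs.length := by simpa using h2
    unfold pvS
    simp only [one_mul]
    have hd : (k * xs.length + i) / xs.length = k := by
      rw [Nat.add_comm, Nat.add_mul_div_right _ _ (by omega), Nat.div_eq_of_lt hi]; omega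
    have hm : (k * xs.length + i) % xs.length = i := by
      rw [Nat.add_comm, Nat.add_mul_mod_self_right, Nat.mod_eq_of_lt hi]
    rw [hd, hm]
    congr 1
    exact List.getD_eq_getElem xs d hi

theorem pvRange5_split (w : Nat) :
    List.range (w + w * 4)
      = List.range' (0*w) w ++ List.range' (1*w) w ++ List.range' (2*w) w
         ++ List.range' (3*w) w ++ List.range' (4*w) w := by
  have h (s m n : Nat) (h : s + m = n) : List.range' s m ++ List.range' n w = List.range' s (m + w) := by
    subst h; simp
  rw [h (0*w) w (1*w) (by ring), h (0*w) (w+w) (2*w) (by ring),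
      h (0*w) (w+w+w) (3*w) (by ring), h (0*w) (w+w+w+w) (4*w) (by ring),
      List.range_eq_range']
  congr 1 <;> ring

-- the self-extending fold with bound len*4 produces the five blocks xs.map (g^[k]), k = 0..4
theorem pvFold_char {α : Type} (g : α → α) (d : α) (xs : List α) (h : xs ≠ []) :
    (List.range (xs.length * 4)).foldl (fun r i => r ++ [g (r.getD i d)]) xs
      = xs.map (g^[0]) ++ xs.map (g^[1]) ++ xs.map (g^[2]) ++ xs.map (g^[3]) ++ xs.map (g^[4]) := by
  rw [pvGrow_eq g d xs h, pvRange5_split xs.length]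
  simp only [List.map_append]
  rw [pvS_block, pvS_block, pvS_block, pvS_block, pvS_block]

-- A's wrap rule written as `v+1 <= 9` is B's `v <= 8`
theorem pvStepA_eq_pvBump : pvStepA = pvBump := by
  funext v; unfold pvStepA pvBump
  by_cases h : v ≤ 8
  · rw [if_pos (by omega), if_pos h]
  · rw [if_neg (by omega), if_neg h]

theorem pvTempArr_eq (row : List Int) : pvTempArr row = row.map pvStepA := by
  unfold pvTempArr
  rw [PySem.List.foldl_append_singleton_eq_map (fun y => pvStepA (row.getD y 0)) (List.range row.length) []]
  rw [List.nil_append]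
  apply List.ext_getElem
  · simp
  · intro i h1 h2
    simp [List.getElem?_eq_getElem (show i < row.length by simpa using h2)]

theorem pvTempArr_iter (k : Nat) (l : List Int) : pvTempArr^[k] l = l.map (pvStepA^[k]) := by
  induction k generalizing l with
  | zero => simp
  | succ k ih =>
    rw [Function.iterate_succ_apply', ih, pvTempArr_eq, Function.iterate_succ' pvStepA k]
    simp [List.map_map]

-- the grids list is the nine iterated bumps of the snapshot
theorem pvGrids_eq (data : List (List Int)) :
    pvGrids data
      = (List.range 9).map (fun k => data.map (fun row => row.map (pvBump^[k]))) := by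
  have hstep : ∀ k : Nat,
      (data.map (fun row => row.map (pvBump^[k]))).map (fun row => row.map pvBump)
        = data.map (fun row => row.map (pvBump^[k+1])) := by
    intro k
    simp only [List.map_map]
    refine List.map_congr_left (fun row _ => ?_)
    simp [Function.comp_def, List.map_map, ← Function.iterate_succ_apply' pvBump k]
  unfold pvGrids
  rw [show List.range 8 = [0,1,2,3,4,5,6,7] from rfl,
      show List.range 9 = [0,1,2,3,4,5,6,7,8] from rfl]
  simp only [List.foldl_cons, List.foldl_nil, List.getLastD_concat, List.map_cons, List.map_nil]
  have h0 : ([data] : List (List (List Int))).getLastD [] = data := rfl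
  rw [h0]
  have e0 : data.map (fun row => row.map (pvBump^[0])) = data := by simp
  rw [show (data.map fun row => row.map pvBump) = data.map (fun row => row.map (pvBump^[1])) by simp]
  rw [hstep 1, hstep 2, hstep 3, hstep 4, hstep 5, hstep 6, hstep 7]
  simp only [List.cons_append, List.nil_append, e0]

theorem pvGrids_getD_getD (data : List (List Int)) (k : Nat) (hk : k < 9)
    (x : Nat) (hx : x < data.length) :
    ((pvGrids data).getD k []).getD x [] = data[x].map (pvBump^[k]) := by
  rw [pvGrids_eq]
  have h9 : k < ((List.range 9).map
      (fun k => data.map (fun row => row.map (pvBump^[k])))).length := by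
    simpa using hk
  rw [List.getD_eq_getElem _ [] h9, List.getElem_map, List.getElem_range,
      List.getD_eq_getElem _ [] (by simpa using hx), List.getElem_map]

-- a grown row (A's first loop) equals B's assembled top row
theorem pvRow_eq (data : List (List Int)) (x : Nat) (hx : x < data.length) :
    pvGrowRow data[x]
      = data[x] ++ (List.range' 1 4).flatMap (fun k => ((pvGrids data).getD k []).getD x []) := by
  rw [show List.range' 1 4 = [1,2,3,4] from rfl]
  simp only [List.flatMap_cons, List.flatMap_nil, List.append_nil]
  rw [pvGrids_getD_getD data 1 (by omega) x hx, pvGrids_getD_getD data 2 (by omega) x hx,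
      pvGrids_getD_getD data 3 (by omega) x hx, pvGrids_getD_getD data 4 (by omega) x hx]
  rcases eq_or_ne data[x] ([] : List Int) with h | h
  · simp [pvGrowRow, h]
  · unfold pvGrowRow
    rw [pvFold_char pvStepA 0 data[x] h, pvStepA_eq_pvBump]
    simp [List.append_assoc]

-- a bottom tile row of offset i, row x, A-style, equals B's assembled row
theorem pvBlock_eq (data : List (List Int)) (i : Nat) (hi : i < 5) (x : Nat) (hx : x < data.length) :
    (pvGrowRow data[x]).map (pvStepA^[i])
      = (List.range 5).flatMap (fun j => ((pvGrids data).getD (i + j) []).getD x []) := by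
  rw [show List.range 5 = [0,1,2,3,4] from rfl]
  simp only [List.flatMap_cons, List.flatMap_nil, List.append_nil, Nat.add_zero]
  rw [pvGrids_getD_getD data i (by omega) x hx, pvGrids_getD_getD data (i+1) (by omega) x hx,
      pvGrids_getD_getD data (i+2) (by omega) x hx, pvGrids_getD_getD data (i+3) (by omega) x hx,
      pvGrids_getD_getD data (i+4) (by omega) x hx]
  rcases eq_or_ne data[x] ([] : List Int) with h | h
  · simp [pvGrowRow, h]
  · unfold pvGrowRow
    rw [pvFold_char pvStepA 0 data[x] h, pvStepA_eq_pvBump]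
    simp only [List.map_append, List.map_map]
    have hc : ∀ j : Nat, pvBump^[i] ∘ pvBump^[j] = pvBump^[i + j] :=
      fun j => (Function.iterate_add pvBump i j).symm
    rw [hc 0, hc 1, hc 2, hc 3, hc 4, Nat.add_zero]
    simp [List.append_assoc]

-- one whole bottom tile-row block of offset i
theorem pvBottom (data : List (List Int)) (i : Nat) (hi : i < 5) :
    (data.map pvGrowRow).map (pvTempArr^[i])
      = (List.range data.length).map (fun x =>
          (List.range 5).flatMap (fun j => ((pvGrids data).getD (i + j) []).getD x [])) := by
  apply List.ext_getElem
  · simp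
  · intro x h1 h2
    have hx : x < data.length := by simpa using h1
    simp only [List.getElem_map, List.getElem_range]
    rw [pvTempArr_iter]
    exact pvBlock_eq data i hi x hx

-- ===== VERDICT (by name: the statement is the Claim_ definition above) =====
theorem enlargeMap_spec : Claim_equal_enlargeMap := by
  unfold Claim_equal_enlargeMap Spec_enlargeMap
  intro data _
  show enlargeMap data = enlargeMap_alt data
  simp only [enlargeMap, enlargeMap_alt]
  rcases eq_or_ne data [] with h | h
  · subst h; rfl
  · have htopne : data.map pvGrowRow ≠ [] := by simpa using h
    rw [List.length_map, show (data.length * 4) = (data.map pvGrowRow).length * 4 by simp]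
    rw [pvFold_char pvTempArr [] (data.map pvGrowRow) htopne]
    have htop : (data.map pvGrowRow).map (pvTempArr^[0])
        = data.mapIdx (fun x row =>
            row ++ (List.range' 1 4).flatMap (fun k => ((pvGrids data).getD k []).getD x [])) := by
      apply List.ext_getElem
      · simp
      · intro x h1 h2
        have hx : x < data.length := by simpa using h1
        simp only [List.getElem_map, List.getElem_mapIdx, Function.iterate_zero, id]
        exact pvRow_eq data x hx
    rw [htop, pvBottom data 1 (by omega), pvBottom data 2 (by omega),
        pvBottom data 3 (by omega), pvBottom data 4 (by omega),
        show List.range' 1 4 = [1,2,3,4] from rfl]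
    simp [List.append_assoc]
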